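-- pv_equiv track=rewrite | github.com/pabloscrosati/PepAlign | _functions/funcs.py | gro_parse
-- ===== SOURCE A (Python) =====
-- def gro_parse(gro_file):
--     # Pull header and footer information
--     title, num_atoms, box_size = gro_file[0], gro_file[1], gro_file[-1]
--
--     resid, resname, atomname, atomnum, x_c, y_c, z_c, x_v, y_v, z_v = [], [], [], [], [], [], [], [], [], []
--
--     # Extract GRO file elements
--     for i in gro_file:
--         if i == title or i == num_atoms or i == box_size:
--             pass
--         else:
--             resid.append(i[0:5].rstrip())
--             resname.append(i[5:10].rstrip())
--             atomname.append(i[10:15].rstrip())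
--             atomnum.append(i[15:20].rstrip())
--             x_c.append(i[20:28].strip())
--             y_c.append(i[28:36].strip())
--             z_c.append(i[36:44].strip())
--             x_v.append(i[44:52].strip())
--             y_v.append(i[52:60].strip())
--             z_v.append(i[60:68].strip())
--     return title, num_atoms, box_size, resid, resname, atomname, atomnum, x_c, y_c, z_c, x_v, y_v, z_v
-- ===== SOURCE B (Python) =====
-- def gro_parse(gro_file):
--     # B: filter once, build row tuples, then transpose with zip(*rows).
--     title, num_atoms, box_size = gro_file[0], gro_file[1], gro_file[-1]
--     rows = [(i[0:5].rstrip(), i[5:10].rstrip(), i[10:15].rstrip(), i[15:20].rstrip(),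
--              i[20:28].strip(), i[28:36].strip(), i[36:44].strip(), i[44:52].strip(),
--              i[52:60].strip(), i[60:68].strip())
--             for i in gro_file
--             if i != title and i != num_atoms and i != box_size]
--     if rows:
--         cols = tuple(list(c) for c in zip(*rows))
--     else:
--         cols = ([], [], [], [], [], [], [], [], [], [])
--     return (title, num_atoms, box_size) + cols
-- ===== Notes on version B (the rewrite author's own statement) =====
-- stated objective: alternative
-- what changed: A fills ten parallel accumulator lists inside one explicit loop; B instead filters the data lines, builds a list of 10-field row tuples in a comprehension, and transposes it with zip(*rows) into the ten column lists.
import Mathlib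
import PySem

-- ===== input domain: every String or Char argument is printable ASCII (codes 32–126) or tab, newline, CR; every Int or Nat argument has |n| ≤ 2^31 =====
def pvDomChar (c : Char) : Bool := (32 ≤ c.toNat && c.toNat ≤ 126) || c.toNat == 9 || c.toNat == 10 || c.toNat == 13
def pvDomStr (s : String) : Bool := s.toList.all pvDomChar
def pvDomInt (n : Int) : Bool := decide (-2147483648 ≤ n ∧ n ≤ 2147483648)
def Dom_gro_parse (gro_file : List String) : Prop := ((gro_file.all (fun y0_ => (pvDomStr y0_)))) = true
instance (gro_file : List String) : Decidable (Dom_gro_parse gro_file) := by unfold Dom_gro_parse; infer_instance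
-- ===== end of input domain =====

-- B replaces A's explicit loop over ten parallel accumulators by filter + row-tuple map + transpose (alternative decomposition; equivalence of return values proved).


-- ===== PORT A =====
-- A's for-loop: ten accumulator lists, extended line by line (lines equal to header/footer skipped).
def groLoopA (t n b : String) (lines : List String)
    (r1 r2 r3 r4 r5 r6 r7 r8 r9 r10 : List String) :
    List String × List String × List String × List String × List String × List String × List String × List String × List String × List String :=
  match lines with
  | [] => (r1, r2, r3, r4, r5, r6, r7, r8, r9, r10)
  | i :: rest =>
    if i == t || i == n || i == b then
      groLoopA t n b rest r1 r2 r3 r4 r5 r6 r7 r8 r9 r10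
    else
      groLoopA t n b rest
        (r1 ++ [PySem.Str.rstrip (PySem.Str.slice i (some 0) (some 5))])
        (r2 ++ [PySem.Str.rstrip (PySem.Str.slice i (some 5) (some 10))])
        (r3 ++ [PySem.Str.rstrip (PySem.Str.slice i (some 10) (some 15))])
        (r4 ++ [PySem.Str.rstrip (PySem.Str.slice i (some 15) (some 20))])
        (r5 ++ [PySem.Str.strip (PySem.Str.slice i (some 20) (some 28))])
        (r6 ++ [PySem.Str.strip (PySem.Str.slice i (some 28) (some 36))])
        (r7 ++ [PySem.Str.strip (PySem.Str.slice i (some 36) (some 44))])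
        (r8 ++ [PySem.Str.strip (PySem.Str.slice i (some 44) (some 52))])
        (r9 ++ [PySem.Str.strip (PySem.Str.slice i (some 52) (some 60))])
        (r10 ++ [PySem.Str.strip (PySem.Str.slice i (some 60) (some 68))])

def gro_parse (gro_file : List String) : String × String × String × List String × List String × List String × List String × List String × List String × List String × List String × List String × List String :=
  let title := (PySem.List.pyGet? gro_file 0).getD ""       -- gro_file[0]; Pre_ excludes the IndexError case
  let num_atoms := (PySem.List.pyGet? gro_file 1).getD ""   -- gro_file[1]
  let box_size := (PySem.List.pyGet? gro_file (-1)).getD "" -- gro_file[-1]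
  let st := groLoopA title num_atoms box_size gro_file [] [] [] [] [] [] [] [] [] []
  (title, num_atoms, box_size, st.1, st.2.1, st.2.2.1, st.2.2.2.1, st.2.2.2.2.1,
   st.2.2.2.2.2.1, st.2.2.2.2.2.2.1, st.2.2.2.2.2.2.2.1, st.2.2.2.2.2.2.2.2.1, st.2.2.2.2.2.2.2.2.2)

-- ===== PORT B =====
-- one row tuple per data line (B's comprehension body)
def pvRowB (i : String) : String × String × String × String × String × String × String × String × String × String :=
  (PySem.Str.rstrip (PySem.Str.slice i (some 0) (some 5)),
   PySem.Str.rstrip (PySem.Str.slice i (some 5) (some 10)),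
   PySem.Str.rstrip (PySem.Str.slice i (some 10) (some 15)),
   PySem.Str.rstrip (PySem.Str.slice i (some 15) (some 20)),
   PySem.Str.strip (PySem.Str.slice i (some 20) (some 28)),
   PySem.Str.strip (PySem.Str.slice i (some 28) (some 36)),
   PySem.Str.strip (PySem.Str.slice i (some 36) (some 44)),
   PySem.Str.strip (PySem.Str.slice i (some 44) (some 52)),
   PySem.Str.strip (PySem.Str.slice i (some 52) (some 60)),
   PySem.Str.strip (PySem.Str.slice i (some 60) (some 68)))

def gro_parse_alt (gro_file : List String) : String × String × String × List String × List String × List String × List String × List String × List String × List String × List String × List String × List String :=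
  let title := (PySem.List.pyGet? gro_file 0).getD ""
  let num_atoms := (PySem.List.pyGet? gro_file 1).getD ""
  let box_size := (PySem.List.pyGet? gro_file (-1)).getD ""
  let rows := (gro_file.filter (fun i => !(i == title || i == num_atoms || i == box_size))).map pvRowB
  -- zip(*rows): each column is the projection of all rows (empty rows give ten empty columns)
  (title, num_atoms, box_size,
   rows.map (·.1), rows.map (·.2.1), rows.map (·.2.2.1), rows.map (·.2.2.2.1),
   rows.map (·.2.2.2.2.1), rows.map (·.2.2.2.2.2.1), rows.map (·.2.2.2.2.2.2.1),
   rows.map (·.2.2.2.2.2.2.2.1), rows.map (·.2.2.2.2.2.2.2.2.1), rows.map (·.2.2.2.2.2.2.2.2.2))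

-- ===== PRECONDITION & SPEC =====
-- A raises IndexError on lists of length < 2 (gro_file[0] / gro_file[1]); exactly those inputs are excluded.
def Pre_gro_parse (gro_file : List String) : Prop := 2 ≤ gro_file.length
instance (gro_file : List String) : Decidable (Pre_gro_parse gro_file) := by unfold Pre_gro_parse; infer_instance
def pvWitness_gro_parse : List String := ["title", "2", "  1RES  ATOM    1   1.0     2.0     3.0", "  10.0 10.0 10.0"]
def Spec_gro_parse (gro_file : List String) (out : String × String × String × List String × List String × List String × List String × List String × List String × List String × List String × List String × List String) : Prop := out = gro_parse_alt gro_file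
instance (gro_file : List String) (out : String × String × String × List String × List String × List String × List String × List String × List String × List String × List String × List String × List String) : Decidable (Spec_gro_parse gro_file out) := by
  unfold Spec_gro_parse
  -- default instance search cannot reach a 13-tuple in one step; build it incrementally
  letI d2 : DecidableEq (List String × List String) := inferInstance
  letI d3 : DecidableEq (List String × List String × List String) := inferInstance
  letI d4 : DecidableEq (List String × List String × List String × List String) := inferInstance
  letI d5 : DecidableEq (List String × List String × List String × List String × List String) := inferInstance
  letI d6 : DecidableEq (List String × List String × List String × List String × List String × List String) := inferInstance
  letI d7 : DecidableEq (List String × List String × List String × List String × List String × List String × List String) := inferInstance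
  letI d8 : DecidableEq (List String × List String × List String × List String × List String × List String × List String × List String) := inferInstance
  letI d9 : DecidableEq (List String × List String × List String × List String × List String × List String × List String × List String × List String) := inferInstance
  letI d10 : DecidableEq (List String × List String × List String × List String × List String × List String × List String × List String × List String × List String) := inferInstance
  letI d11 : DecidableEq (String × List String × List String × List String × List String × List String × List String × List String × List String × List String × List String) := inferInstance
  letI d12 : DecidableEq (String × String × List String × List String × List String × List String × List String × List String × List String × List String × List String × List String) := inferInstance
  letI d13 : DecidableEq (String × String × String × List String × List String × List String × List String × List String × List String × List String × List String × List String × List String) := inferInstance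
  exact d13 out (gro_parse_alt gro_file)

-- ===== CLAIM (what is proved, stated in full; the proofs are below) =====
def Claim_equal_gro_parse : Prop := ∀ (gro_file : List String), Dom_gro_parse gro_file → Pre_gro_parse gro_file → Spec_gro_parse gro_file (gro_parse gro_file)

-- ===== LEMMAS AND PROOFS =====
-- A's loop leaves each accumulator extended by the corresponding column of the filtered lines.
theorem groLoopA_eq (t n b : String) (lines : List String)
    (r1 r2 r3 r4 r5 r6 r7 r8 r9 r10 : List String) :
    groLoopA t n b lines r1 r2 r3 r4 r5 r6 r7 r8 r9 r10 =
      (let rows := (lines.filter (fun i => !(i == t || i == n || i == b))).map pvRowB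
       (r1 ++ rows.map (·.1), r2 ++ rows.map (·.2.1), r3 ++ rows.map (·.2.2.1),
        r4 ++ rows.map (·.2.2.2.1), r5 ++ rows.map (·.2.2.2.2.1),
        r6 ++ rows.map (·.2.2.2.2.2.1), r7 ++ rows.map (·.2.2.2.2.2.2.1),
        r8 ++ rows.map (·.2.2.2.2.2.2.2.1), r9 ++ rows.map (·.2.2.2.2.2.2.2.2.1),
        r10 ++ rows.map (·.2.2.2.2.2.2.2.2.2))) := by
  induction lines generalizing r1 r2 r3 r4 r5 r6 r7 r8 r9 r10 with
  | nil => simp [groLoopA]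
  | cons i rest ih =>
    by_cases h : (i == t || i == n || i == b) = true
    · have hf : List.filter (fun j => !(j == t || j == n || j == b)) (i :: rest)
          = List.filter (fun j => !(j == t || j == n || j == b)) rest := by
        rw [List.filter_cons]; simp [h]
      rw [groLoopA, if_pos h, ih, hf]
    · have h' : ¬((i == t || i == n || i == b) = true) := by simp [h]
      have hf : List.filter (fun j => !(j == t || j == n || j == b)) (i :: rest)
          = i :: List.filter (fun j => !(j == t || j == n || j == b)) rest := by
        rw [List.filter_cons]; simp [h]
      rw [groLoopA, if_neg h', ih, hf]
      simp [pvRowB]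

-- ===== VERDICT (by name: the statement is the Claim_ definition above) =====
theorem gro_parse_spec : Claim_equal_gro_parse := by
  intro gro_file _ _
  unfold Spec_gro_parse gro_parse gro_parse_alt
  simp [groLoopA_eq]
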